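-- pv_equiv track=rewrite | github.com/wilfredarin/Interviewbit | Strings/stringoholics.py | solve
-- ===== SOURCE A (Python) =====
-- def solve(A):
--
--     def lps(pat):
--         s = pat+pat
--         i = s.find(s,1,-1)
--         return len(pat) if i==-1 else len(pat[:i])
--
--     def gcd(a,b):
--         if b>a:
--             a,b = b,a
--         if b==0:return a
--         return gcd(b,a%b)
--
--     def lcm(a,b):
--         return ((a*b)//gcd(a,b))
--
--
--     ans = 1
--     for s in A:
--         n = lps(s)
--         for i in range(1,2*n+1):
--             if ((i*(i+1))//2)%n == 0:
--                 ans =lcm(i,ans)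
--                 break
--     return ans%(10**9+7)
-- ===== SOURCE B (Python) =====
-- def solve(A):
--     def gcd(a, b):
--         while b:
--             a, b = b, a % b
--         return a
--
--     def min_idx(L):
--         # smallest i >= 1 with i*(i+1)//2 divisible by L (triangular accumulator)
--         i, t = 1, 1
--         while t % L:
--             i += 1
--             t += i
--         return i
--
--     ans = 1
--     seen = set()
--     for s in A:
--         L = len(s)
--         if L and L not in seen:
--             seen.add(L)
--             m = min_idx(L)
--             ans = ans * m // gcd(ans, m)
--     return ans % (10**9 + 7)
-- ===== Notes on version B (the rewrite author's own statement) =====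
-- stated objective: simpler
-- what changed: A's doubled-string find can never succeed (it searches the doubled string inside a strictly shorter window), so the scanned period is always len(s); B uses len(s) directly, deduplicates lengths with a seen-set so each distinct length is scanned and folded into the lcm only once, scans with a running triangular accumulator instead of recomputing i*(i+1)//2, and uses an iterative gcd instead of A's recursive swap gcd.
import Mathlib
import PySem

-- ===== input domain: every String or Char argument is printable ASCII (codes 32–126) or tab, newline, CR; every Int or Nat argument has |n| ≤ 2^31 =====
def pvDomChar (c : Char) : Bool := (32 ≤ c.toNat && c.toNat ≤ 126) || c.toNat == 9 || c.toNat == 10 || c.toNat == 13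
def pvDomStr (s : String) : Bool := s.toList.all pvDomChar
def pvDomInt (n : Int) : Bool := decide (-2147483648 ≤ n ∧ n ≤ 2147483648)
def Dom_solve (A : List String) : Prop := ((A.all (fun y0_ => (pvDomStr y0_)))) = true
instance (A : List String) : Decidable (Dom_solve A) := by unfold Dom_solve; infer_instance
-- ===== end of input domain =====

-- B drops A's vacuous doubled-string find (it always returns -1, so the scanned period is
-- len(s)), deduplicates string lengths with a seen-set, scans with a running triangular
-- accumulator and uses an iterative gcd; same return value (objective: simpler).

-- ===== PORT A =====
def pvLpsA (pat : String) : Int :=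
  let s := pat ++ pat
  let i := PySem.Str.findFrom s s 1 (some (-1))
  if i = -1 then PySem.Str.len pat else PySem.Str.len (PySem.Str.slice pat none (some i))

-- A's recursive gcd (the 'a,b = b,a' swap is inlined into the two branches), ported with
-- fuel; the call site supplies enough fuel for every argument pair the program reaches.
def pvGcdA : Nat → Int → Int → Int
  | 0, a, _ => a
  | fuel+1, a, b =>
    if b > a then
      if a = 0 then b else pvGcdA fuel a (PySem.Int.mod b a)
    else
      if b = 0 then a else pvGcdA fuel b (PySem.Int.mod a b)

def pvLcmA (a b : Int) : Int :=
  PySem.Int.floordiv (a * b) (pvGcdA (a.toNat + b.toNat + 2) a b)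

def solve (A : List String) : Int :=
  let ans := A.foldl (fun ans s =>
    let n := pvLpsA s
    match (PySem.List.pyRange 1 (2*n+1) 1).find?
        (fun i => PySem.Int.mod (PySem.Int.floordiv (i*(i+1)) 2) n == 0) with
    | some i => pvLcmA i ans
    | none => ans) 1
  PySem.Int.mod ans (10^9+7)

-- ===== PORT B =====
-- B's while-loop gcd, ported with fuel (enough for every reachable argument pair).
def pvGcdBGo : Nat → Int → Int → Int
  | 0, a, _ => a
  | fuel+1, a, b => if b ≠ 0 then pvGcdBGo fuel b (PySem.Int.mod a b) else a

def pvGcdB (a b : Int) : Int := pvGcdBGo (b.toNat + 2) a b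

-- B's triangular-accumulator while loop, ported with fuel 2L (the loop stops by i = 2L-1).
def pvMinIdxGo : Nat → Int → Int → Int → Int
  | 0, _, i, _ => i
  | fuel+1, L, i, t =>
    if PySem.Int.mod t L ≠ 0 then pvMinIdxGo fuel L (i+1) (t+(i+1)) else i

def pvMinIdx (L : Int) : Int := pvMinIdxGo (2*L).toNat L 1 1

def solve_alt (A : List String) : Int :=
  let st := A.foldl (fun (st : Int × PySem.Set Int) s =>
    let L := PySem.Str.len s
    if L ≠ 0 ∧ ¬ L ∈ st.2 then
      let m := pvMinIdx L
      (PySem.Int.floordiv (st.1 * m) (pvGcdB st.1 m), PySem.Set.add st.2 L)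
    else st) (1, PySem.Set.empty)
  PySem.Int.mod st.1 (10^9+7)

-- ===== PRECONDITION & SPEC =====
def Spec_solve (A : List String) (out : Int) : Prop := out = solve_alt A
instance (A : List String) (out : Int) : Decidable (Spec_solve A out) := by unfold Spec_solve; infer_instance

-- ===== CLAIM (what is proved, stated in full; the proofs are below) =====
def Claim_equal_solve : Prop := ∀ (A : List String), Dom_solve A → Spec_solve A (solve A)

-- ===== LEMMAS AND PROOFS =====

theorem pvGcdA_eq : ∀ (fuel : Nat) (a b : Int), 0 < a → 0 ≤ b → a.toNat + b.toNat < fuel →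
    pvGcdA fuel a b = ((Nat.gcd a.toNat b.toNat : Nat) : Int) := by
  intro fuel
  induction fuel with
  | zero => intro a b ha hb h; omega
  | succ n ih =>
    intro a b ha hb h
    simp only [pvGcdA]
    by_cases hswap : b > a
    · rw [if_pos hswap, if_neg (by omega : ¬ a = 0)]
      have hmodE : PySem.Int.mod b a = b % a := PySem.Int.mod_eq_emod_of_pos ha
      have h1 : 0 ≤ b % a := Int.emod_nonneg b (by omega)
      have h2 : b % a < a := Int.emod_lt_of_pos b ha
      have hcast : ((b.toNat % a.toNat : Nat) : Int) = b % a := by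
        push_cast
        rw [Int.toNat_of_nonneg hb, Int.toNat_of_nonneg (le_of_lt ha)]
      rw [hmodE, ih a (b % a) ha h1 (by omega)]
      have h4 : (b % a).toNat = b.toNat % a.toNat := by omega
      rw [h4, Nat.gcd_comm a.toNat, ← Nat.gcd_rec]
    · rw [if_neg hswap]
      by_cases hb0 : b = 0
      · rw [if_pos hb0, hb0]
        simp [Int.toNat_of_nonneg (le_of_lt ha)]
      · rw [if_neg hb0]
        have hbpos : 0 < b := by omega
        have hmodE : PySem.Int.mod a b = a % b := PySem.Int.mod_eq_emod_of_pos hbpos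
        have h1 : 0 ≤ a % b := Int.emod_nonneg a (by omega)
        have h2 : a % b < b := Int.emod_lt_of_pos a hbpos
        have hcast : ((a.toNat % b.toNat : Nat) : Int) = a % b := by
          push_cast
          rw [Int.toNat_of_nonneg (le_of_lt ha), Int.toNat_of_nonneg hb]
        rw [hmodE, ih b (a % b) hbpos h1 (by omega)]
        have h4 : (a % b).toNat = a.toNat % b.toNat := by omega
        rw [h4, Nat.gcd_comm b.toNat, ← Nat.gcd_rec, Nat.gcd_comm b.toNat a.toNat]

theorem pvLcmA_eq (a b : Int) (ha : 0 < a) (hb : 0 < b) :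
    pvLcmA a b = ((Nat.lcm a.toNat b.toNat : Nat) : Int) := by
  unfold pvLcmA
  rw [pvGcdA_eq _ a b ha (le_of_lt hb) (by omega)]
  have hg : 0 < Nat.gcd a.toNat b.toNat := Nat.gcd_pos_of_pos_left _ (by omega)
  rw [PySem.Int.floordiv_eq_ediv_of_pos (by exact_mod_cast hg)]
  have hab : a * b = ((Nat.gcd a.toNat b.toNat * Nat.lcm a.toNat b.toNat : Nat) : Int) := by
    rw [Nat.gcd_mul_lcm]
    push_cast
    rw [Int.toNat_of_nonneg (le_of_lt ha), Int.toNat_of_nonneg (le_of_lt hb)]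
  rw [hab]
  push_cast
  rw [Int.mul_ediv_cancel_left _ (by exact_mod_cast hg.ne')]

theorem pvGcdBGo_eq : ∀ (fuel : Nat) (a b : Int), 0 < a → 0 ≤ b → b.toNat + 1 < fuel →
    pvGcdBGo fuel a b = ((Nat.gcd a.toNat b.toNat : Nat) : Int) := by
  intro fuel
  induction fuel with
  | zero => intro a b ha hb h; omega
  | succ n ih =>
    intro a b ha hb h
    simp only [pvGcdBGo]
    by_cases hb0 : b = 0
    · rw [if_neg (by simp [hb0]), hb0]
      simp [Int.toNat_of_nonneg (le_of_lt ha)]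
    · rw [if_pos hb0]
      have hbpos : 0 < b := by omega
      have hmodE : PySem.Int.mod a b = a % b := PySem.Int.mod_eq_emod_of_pos hbpos
      have h1 : 0 ≤ a % b := Int.emod_nonneg a (by omega)
      have h2 : a % b < b := Int.emod_lt_of_pos a hbpos
      have hcast : ((a.toNat % b.toNat : Nat) : Int) = a % b := by
        push_cast
        rw [Int.toNat_of_nonneg (le_of_lt ha), Int.toNat_of_nonneg hb]
      rw [hmodE, ih b (a % b) hbpos h1 (by omega)]
      have h4 : (a % b).toNat = a.toNat % b.toNat := by omega
      rw [h4, Nat.gcd_comm b.toNat, ← Nat.gcd_rec, Nat.gcd_comm b.toNat a.toNat]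

theorem pvLcmB_eq (a b : Int) (ha : 0 < a) (hb : 0 < b) :
    PySem.Int.floordiv (a * b) (pvGcdB a b) = ((Nat.lcm a.toNat b.toNat : Nat) : Int) := by
  unfold pvGcdB
  rw [pvGcdBGo_eq _ a b ha (le_of_lt hb) (by omega)]
  have hg : 0 < Nat.gcd a.toNat b.toNat := Nat.gcd_pos_of_pos_left _ (by omega)
  rw [PySem.Int.floordiv_eq_ediv_of_pos (by exact_mod_cast hg)]
  have hab : a * b = ((Nat.gcd a.toNat b.toNat * Nat.lcm a.toNat b.toNat : Nat) : Int) := by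
    rw [Nat.gcd_mul_lcm]
    push_cast
    rw [Int.toNat_of_nonneg (le_of_lt ha), Int.toNat_of_nonneg (le_of_lt hb)]
  rw [hab]
  push_cast
  rw [Int.mul_ediv_cancel_left _ (by exact_mod_cast hg.ne')]

theorem findFrom_self (cs : List Char) : PySem.Chars.findFrom cs cs 1 (some (-1)) = -1 := by
  simp only [PySem.Chars.findFrom]
  by_cases h2 : 2 ≤ cs.length
  · have hnlt : ¬ ((cs.length : Int) < -1) := by omega
    have hneg : (-1 : Int) < 0 := by norm_num
    have hsum : ¬ ((-1 : Int) + cs.length < 0) := by omega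
    have hstart : ¬ ((1 : Int) < 0) := by norm_num
    simp only [hnlt, if_false, hneg, if_true, hsum, if_neg hstart]
    rw [if_neg (by omega : ¬ ((-1 : Int) + cs.length < 1))]
    have hfind : PySem.Chars.find (List.drop (1:Int).toNat (List.take ((-1 : Int) + cs.length).toNat cs)) cs = -1 := by
      rw [PySem.Chars.find_eq_neg_one_iff]
      intro hinf
      have hle := hinf.length_le
      simp only [List.length_drop, List.length_take] at hle
      omega
    rw [if_pos hfind]
  · -- length 0 or 1: the window is empty before the start index
    rw [if_pos]
    have h0 : (0 : Int) ≤ cs.length := by positivity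
    split_ifs <;> omega

theorem pvLpsA_eq (pat : String) : pvLpsA pat = PySem.Str.len pat := by
  unfold pvLpsA
  simp [findFrom_self]

theorem scan_eq : ∀ (fuel : Nat) (L i t : Int), 0 < L → 1 ≤ i → i ≤ 2*L - 1 → t*2 = i*(i+1) →
    (2*L - 1 - i).toNat < fuel →
    ∃ m, (PySem.List.pyRange i (2*L+1) 1).find?
          (fun j => PySem.Int.mod (PySem.Int.floordiv (j*(j+1)) 2) L == 0) = some m
      ∧ pvMinIdxGo fuel L i t = m ∧ i ≤ m := by
  intro fuel
  induction fuel with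
  | zero => intro L i t hL hi hub ht hf; omega
  | succ n ih =>
    intro L i t hL hi hub ht hf
    have hcons : PySem.List.pyRange i (2*L+1) 1 = i :: PySem.List.pyRange (i+1) (2*L+1) 1 :=
      PySem.List.pyRange_one_cons (by omega)
    have hdiv : PySem.Int.floordiv (i*(i+1)) 2 = t := by
      rw [PySem.Int.floordiv_eq_iff_of_pos (by norm_num)]
      constructor
      · linarith [ht]
      · linarith [ht]
    by_cases hm : PySem.Int.mod t L = 0
    · have hpredT : ((fun j => PySem.Int.mod (PySem.Int.floordiv (j*(j+1)) 2) L == 0) i) = true := by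
        show (PySem.Int.mod (PySem.Int.floordiv (i*(i+1)) 2) L == 0) = true
        rw [hdiv]
        simp only [beq_iff_eq]
        exact hm
      refine ⟨i, ?_, ?_, le_refl i⟩
      · rw [hcons]
        exact List.find?_cons_of_pos hpredT
      · simp only [pvMinIdxGo]
        rw [if_neg (not_not_intro hm)]
    · have hne : i ≠ 2*L - 1 := by
        intro hEq
        apply hm
        have h2 : t * 2 = (L*(2*L-1)) * 2 := by
          rw [hEq] at ht
          linear_combination ht
        have ht' : t = L * (2*L-1) := mul_right_cancel₀ (by norm_num) h2
        rw [PySem.Int.mod_eq_zero_iff_dvd, ht']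
        exact Dvd.intro _ rfl
      obtain ⟨m, hfind, hgo, hle⟩ := ih L (i+1) (t+(i+1)) hL (by omega) (by omega)
        (by linear_combination ht) (by omega)
      have hpredF : ¬ (((fun j => PySem.Int.mod (PySem.Int.floordiv (j*(j+1)) 2) L == 0) i) = true) := by
        show ¬ ((PySem.Int.mod (PySem.Int.floordiv (i*(i+1)) 2) L == 0) = true)
        rw [hdiv]
        simp only [beq_iff_eq]
        exact hm
      refine ⟨m, ?_, ?_, by omega⟩
      · rw [hcons]
        refine Eq.trans ?_ hfind
        exact List.find?_cons_of_neg hpredF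
      · simp only [pvMinIdxGo]
        rw [if_pos hm]
        exact hgo

-- proof-side names for the two loop bodies (definitionally the lambdas in the ports)
def pvStepA (ans : Int) (s : String) : Int :=
  let n := pvLpsA s
  match (PySem.List.pyRange 1 (2*n+1) 1).find?
      (fun i => PySem.Int.mod (PySem.Int.floordiv (i*(i+1)) 2) n == 0) with
  | some i => pvLcmA i ans
  | none => ans

def pvStepB (st : Int × PySem.Set Int) (s : String) : Int × PySem.Set Int :=
  let L := PySem.Str.len s
  if L ≠ 0 ∧ ¬ L ∈ st.2 then
    let m := pvMinIdx L
    (PySem.Int.floordiv (st.1 * m) (pvGcdB st.1 m), PySem.Set.add st.2 L)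
  else st

theorem main_fold : ∀ (lst : List String) (ans : Int) (seen : PySem.Set Int),
    0 < ans → (∀ L ∈ seen, pvMinIdx L ∣ ans) →
    lst.foldl (fun ans s =>
      let n := pvLpsA s
      match (PySem.List.pyRange 1 (2*n+1) 1).find?
          (fun i => PySem.Int.mod (PySem.Int.floordiv (i*(i+1)) 2) n == 0) with
      | some i => pvLcmA i ans
      | none => ans) ans
    = (lst.foldl (fun (st : Int × PySem.Set Int) s =>
        let L := PySem.Str.len s
        if L ≠ 0 ∧ ¬ L ∈ st.2 then
          let m := pvMinIdx L
          (PySem.Int.floordiv (st.1 * m) (pvGcdB st.1 m), PySem.Set.add st.2 L)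
        else st) (ans, seen)).1 := by
  intro lst
  induction lst with
  | nil => intro ans seen h hinv; rfl
  | cons s rest ih =>
    intro ans seen hpos hinv
    show List.foldl pvStepA ans (s :: rest) = (List.foldl pvStepB (ans, seen) (s :: rest)).1
    rw [List.foldl_cons, List.foldl_cons]
    have hlen : PySem.Str.len s = (s.toList.length : Int) := by
      simp [PySem.Str.len_eq]
    have hL0 : 0 ≤ PySem.Str.len s := by rw [hlen]; positivity
    by_cases hL : PySem.Str.len s = 0
    · have hA : pvStepA ans s = ans := by
        show (match (PySem.List.pyRange 1 (2 * pvLpsA s + 1) 1).find?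
              (fun i => PySem.Int.mod (PySem.Int.floordiv (i*(i+1)) 2) (pvLpsA s) == 0) with
          | some i => pvLcmA i ans
          | none => ans) = ans
        rw [pvLpsA_eq, hL, PySem.List.pyRange_one_eq_nil (by omega)]
        rfl
      have hB : pvStepB (ans, seen) s = (ans, seen) := by
        show (if PySem.Str.len s ≠ 0 ∧ ¬ PySem.Str.len s ∈ seen then
            (PySem.Int.floordiv (ans * pvMinIdx (PySem.Str.len s)) (pvGcdB ans (pvMinIdx (PySem.Str.len s))),
              PySem.Set.add seen (PySem.Str.len s))
          else (ans, seen)) = (ans, seen)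
        rw [if_neg (fun h => h.1 hL)]
      rw [hA, hB]
      exact ih ans seen hpos hinv
    · have hLpos : 0 < PySem.Str.len s := by omega
      obtain ⟨m, hfind, hgo, hm1⟩ := scan_eq (2 * PySem.Str.len s).toNat (PySem.Str.len s) 1 1
        hLpos (le_refl 1) (by omega) (by ring) (by omega)
      have hpm : pvMinIdx (PySem.Str.len s) = m := hgo
      have hmpos : 0 < m := by omega
      have hA : pvStepA ans s = pvLcmA m ans := by
        show (match (PySem.List.pyRange 1 (2 * pvLpsA s + 1) 1).find?
              (fun i => PySem.Int.mod (PySem.Int.floordiv (i*(i+1)) 2) (pvLpsA s) == 0) with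
          | some i => pvLcmA i ans
          | none => ans) = pvLcmA m ans
        rw [pvLpsA_eq, hfind]
      by_cases hmem : PySem.Str.len s ∈ seen
      · have hdvd : m ∣ ans := by rw [← hpm]; exact hinv _ hmem
        have hdvdN : m.toNat ∣ ans.toNat := by
          have h' := hdvd
          rw [← Int.toNat_of_nonneg (le_of_lt hmpos), ← Int.toNat_of_nonneg (le_of_lt hpos)] at h'
          exact_mod_cast h'
        have hlcm : pvLcmA m ans = ans := by
          rw [pvLcmA_eq m ans hmpos hpos]
          have hl : Nat.lcm m.toNat ans.toNat = ans.toNat :=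
            Nat.dvd_antisymm (Nat.lcm_dvd hdvdN dvd_rfl) (Nat.dvd_lcm_right _ _)
          rw [hl, Int.toNat_of_nonneg (le_of_lt hpos)]
        have hB : pvStepB (ans, seen) s = (ans, seen) := by
          show (if PySem.Str.len s ≠ 0 ∧ ¬ PySem.Str.len s ∈ seen then
              (PySem.Int.floordiv (ans * pvMinIdx (PySem.Str.len s)) (pvGcdB ans (pvMinIdx (PySem.Str.len s))),
                PySem.Set.add seen (PySem.Str.len s))
            else (ans, seen)) = (ans, seen)
          rw [if_neg (fun h => h.2 hmem)]
        rw [hA, hlcm, hB]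
        exact ih ans seen hpos hinv
      · have hB : pvStepB (ans, seen) s
            = (((Nat.lcm ans.toNat m.toNat : Nat) : Int), PySem.Set.add seen (PySem.Str.len s)) := by
          show (if PySem.Str.len s ≠ 0 ∧ ¬ PySem.Str.len s ∈ seen then
              (PySem.Int.floordiv (ans * pvMinIdx (PySem.Str.len s)) (pvGcdB ans (pvMinIdx (PySem.Str.len s))),
                PySem.Set.add seen (PySem.Str.len s))
            else (ans, seen))
            = (((Nat.lcm ans.toNat m.toNat : Nat) : Int), PySem.Set.add seen (PySem.Str.len s))
          rw [if_pos ⟨hL, hmem⟩, hpm, pvLcmB_eq ans m hpos hmpos]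
        have hAval : pvLcmA m ans = ((Nat.lcm ans.toNat m.toNat : Nat) : Int) := by
          rw [pvLcmA_eq m ans hmpos hpos, Nat.lcm_comm]
        have hposN : 0 < ((Nat.lcm ans.toNat m.toNat : Nat) : Int) := by
          have hne : Nat.lcm ans.toNat m.toNat ≠ 0 :=
            Nat.lcm_ne_zero (by omega) (by omega)
          omega
        have hinv' : ∀ L ∈ PySem.Set.add seen (PySem.Str.len s),
            pvMinIdx L ∣ ((Nat.lcm ans.toNat m.toNat : Nat) : Int) := by
          intro L hLmem
          rcases (PySem.Set.mem_add seen (PySem.Str.len s) L).mp hLmem with hold | hnew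
          · refine dvd_trans (hinv L hold) ?_
            have hd : (ans.toNat : Int) ∣ ((Nat.lcm ans.toNat m.toNat : Nat) : Int) :=
              Int.natCast_dvd_natCast.mpr (Nat.dvd_lcm_left _ _)
            rwa [Int.toNat_of_nonneg (le_of_lt hpos)] at hd
          · rw [hnew, hpm]
            have hd : (m.toNat : Int) ∣ ((Nat.lcm ans.toNat m.toNat : Nat) : Int) :=
              Int.natCast_dvd_natCast.mpr (Nat.dvd_lcm_right _ _)
            rwa [Int.toNat_of_nonneg (le_of_lt hmpos)] at hd
        rw [hA, hAval, hB]
        exact ih _ _ hposN hinv'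

-- ===== VERDICT (by name: the statement is the Claim_ definition above) =====
theorem solve_spec : Claim_equal_solve := by
  intro A _
  unfold Spec_solve solve solve_alt
  rw [main_fold A 1 PySem.Set.empty one_pos (by intro L hL; cases hL)]
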